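-- pv_equiv track=rewrite | github.com/MarkLaMer/StackBasedRecursionSimulation | stack_based_recursion_simulation.py | function_3
-- ===== SOURCE A (Python) =====
-- class Stack:
--     # Construct new stack:
--     def __init__ (self):
--         """
--         Create a stack with a fixed size of 10
--         """
--         self.array = [None]*10
--         self.size = 0  # Number of elements currently in the stack
--
--     # Neccessary functions for Stack:
--     def push(self, item):
--         """
--         Push an item onto the stack (end of array). If the stack is full, double the size of the stack
--         """
--         if self.size == len(self.array):
--             self.array = self.array + [None]*len(self.array)
--         self.array[self.size] = item # Add the item to the end of the array
--         self.size += 1 #Update the size of the stack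
--
--     def pop(self):
--         """
--         Pop the last item from the stack array. If the stack is empty, return None
--         """
--         if self.size == 0:
--             return None
--         value = self.array[self.size-1]
--         self.array[self.size-1] = None # Set the last elem to None
--         self.size -= 1 #Decrease the size of the stack
--         return value
--
--     def isEmpty(self):
--         """
--         Return True if the stack is empty, False otherwise
--         """
--         return self.size == 0
--
--   # Useful functions for a stack:
--
--     def peak(self):
--         """
--         Return the item at the top of the stack
--         """
--         if self.size == 0:
--             return None
--         return self.array[self.size-1]
--
--     def isFull(self):
--         """
--         Return True if the stack is full, False otherwise
--         """
--         return self.size == len(self.array)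
--
--     def __str__(self):
--         """
--         Return a string representation of the stack.
--         """
--         return str([self.array[i] for i in range(self.size)])
--
-- def function_3(a, b):
--     #Think of the problem as a binary tree. Every node may have a left and right child node bacsed on the parent node a, b and m values.
--     S = Stack()
--     S.push((a, b, False))  # Push the initial range and the flag to indicate we have not "completed" the node connections to children.
--     result = []     # Initialize list to store the value of m from the node traversal in-order
--
--     while not S.isEmpty():
--         a, b, completed = S.pop() #load up the last node from the stac (moving down left nodes and progressing right)
--
--         m = (a+b)//2 #calculate the mid point ("m") value
--
--         if completed: #grab the value of m from the last node we popped off the stack if we have already completed a search for any children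
--             # Append the popped node's mid point value
--             result.append(m)
--             continue  # next iteration!
--
--         if a <= b:
--             if m+1 <= b: #if right node condition is satisfied:
--                 S.push((m+1, b, False)) # Push the right side
--             #Push the parent node because we popped it off the stack earlier in the loop to organize the list.
--             # Now that we are checking its children, we can say we completed the search of this node.
--             S.push((a,b, True)) #set flag to true
--             if a <= m-1: #if left node condition is satisfied:
--                 S.push((a, m-1, False)) # Push the left side
--     return result
-- ===== SOURCE B (Python) =====
-- def function_3(a, b):
--     # Closed form: the in-order traversal of the midpoint tree over [a, b]
--     # visits every integer of the range exactly once, in increasing order.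
--     return list(range(a, b + 1))
-- ===== Notes on version B (the rewrite author's own statement) =====
-- stated objective: faster
-- what changed: Replaces the explicit-stack midpoint-tree in-order traversal with the closed form list(range(a, b+1)), which it provably equals.
import Mathlib
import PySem

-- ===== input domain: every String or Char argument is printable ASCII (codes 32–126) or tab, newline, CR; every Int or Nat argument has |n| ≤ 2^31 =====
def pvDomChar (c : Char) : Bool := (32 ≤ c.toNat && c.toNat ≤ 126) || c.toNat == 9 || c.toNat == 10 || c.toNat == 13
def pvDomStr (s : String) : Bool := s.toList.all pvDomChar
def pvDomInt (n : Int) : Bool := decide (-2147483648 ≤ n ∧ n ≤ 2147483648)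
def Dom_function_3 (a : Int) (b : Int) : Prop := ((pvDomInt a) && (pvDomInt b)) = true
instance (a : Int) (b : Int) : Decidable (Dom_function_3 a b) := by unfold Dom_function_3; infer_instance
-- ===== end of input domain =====

-- B replaces A's explicit-stack midpoint-tree in-order traversal with the closed form
-- list(range(a, b+1)), which it provably equals.

-- ===== PORT A =====
-- weight of one stack entry: an upper bound on the number of loop iterations the entry
-- causes, used only as the fuel of the loop (the fuel guard makes the recursion structural;
-- pvLoop_fuel_enough below shows the fuel branch is never the one that returns)
def pvWt : Int × Int × Bool → Nat
  | (a, b, c) => if c then 1 else if a ≤ b then 3 * (b - a + 1).toNat + 1 else 1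

-- the while loop of A: the stack is a list (head = top), `res` the accumulated result
def pvLoop : Nat → List (Int × Int × Bool) → List Int → List Int
  | _, [], res => res
  | 0, _ :: _, res => res   -- fuel guard only; never reached from function_3's initial fuel
  | fuel + 1, (a, b, completed) :: S, res =>
    let m := PySem.Int.floordiv (a + b) 2
    if completed then pvLoop fuel S (res ++ [m])
    else if a ≤ b then
      -- pushes: right child (if any), then parent with flag set, then left child (if any)
      pvLoop fuel ((if a ≤ m - 1 then [(a, m - 1, false)] else []) ++ [(a, b, true)] ++
                   (if m + 1 ≤ b then [(m + 1, b, false)] else []) ++ S) res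
    else pvLoop fuel S res

def function_3 (a : Int) (b : Int) : List Int :=
  pvLoop (pvWt (a, b, false)) [(a, b, false)] []

-- ===== PORT B =====
def function_3_alt (a : Int) (b : Int) : List Int := PySem.List.pyRange a (b + 1) 1

-- ===== PRECONDITION & SPEC =====
def Spec_function_3 (a : Int) (b : Int) (out : List Int) : Prop := out = function_3_alt a b
instance (a : Int) (b : Int) (out : List Int) : Decidable (Spec_function_3 a b out) := by unfold Spec_function_3; infer_instance

-- ===== CLAIM (what is proved, stated in full; the proofs are below) =====
def Claim_equal_function_3 : Prop := ∀ (a : Int) (b : Int), Dom_function_3 a b → Spec_function_3 a b (function_3 a b)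

-- ===== LEMMAS AND PROOFS =====

-- the values each stack entry will contribute to the result, in order
def pvVal : Int × Int × Bool → List Int
  | (a, b, c) =>
    if c then [PySem.Int.floordiv (a + b) 2] else PySem.List.pyRange a (b + 1) 1

-- range(a, b+1) splits at the midpoint m = (a+b)//2 when a ≤ b
lemma pvRange_split (a b : Int) (hab : a ≤ b) :
    PySem.List.pyRange a (b + 1) 1 =
      PySem.List.pyRange a (PySem.Int.floordiv (a + b) 2) 1 ++
      [PySem.Int.floordiv (a + b) 2] ++
      PySem.List.pyRange (PySem.Int.floordiv (a + b) 2 + 1) (b + 1) 1 := by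
  have hm := PySem.Int.floordiv_two_mid_bounds (lo := a) (hi := b) hab
  set m := PySem.Int.floordiv (a + b) 2 with hmdef
  rw [PySem.List.pyRange_one_append a m (b + 1) (by omega) (by omega),
      PySem.List.pyRange_one_append m (m + 1) (b + 1) (by omega) (by omega),
      PySem.List.pyRange_one_singleton, List.append_assoc]

-- total weight of the three entries pushed for a non-completed node (a,b), a ≤ b:
-- strictly less than the node's own weight (this is what makes the fuel sufficient)
lemma pvWt_children (a b m : Int) (hm1 : a ≤ m) (hm2 : m ≤ b) :
    (((if a ≤ m - 1 then [(a, m - 1, false)] else []) ++ [(a, b, true)] ++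
      (if m + 1 ≤ b then [(m + 1, b, false)] else [])).map pvWt).sum + 1 ≤
      pvWt (a, b, false) := by
  split_ifs <;> simp [pvWt] <;> split_ifs <;> omega

-- with enough fuel, the loop appends the contribution of every stack entry, in order
lemma pvLoop_fuel_enough : ∀ (fuel : Nat) (S : List (Int × Int × Bool)) (res : List Int),
    (S.map pvWt).sum ≤ fuel → pvLoop fuel S res = res ++ (S.map pvVal).flatten := by
  intro fuel
  induction fuel with
  | zero =>
    intro S res h
    match S with
    | [] => simp [pvLoop]
    | (a, b, c) :: S =>
      exfalso
      have : 1 ≤ pvWt (a, b, c) := by simp only [pvWt]; split_ifs <;> omega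
      simp only [List.map_cons, List.sum_cons] at h; omega
  | succ fuel ih =>
    intro S res h
    match S with
    | [] => simp [pvLoop]
    | (a, b, c) :: S =>
      simp only [List.map_cons, List.sum_cons] at h
      by_cases hc : c
      · subst hc
        rw [pvLoop]
        simp only [if_pos rfl]
        rw [ih S (res ++ [PySem.Int.floordiv (a + b) 2]) (by simp [pvWt] at h; omega)]
        simp [pvVal]
      · simp only [Bool.not_eq_true] at hc; subst hc
        rw [pvLoop]
        simp only [Bool.false_eq_true, if_neg (by simp : ¬False)]
        by_cases hab : a ≤ b
        · have hm := PySem.Int.floordiv_two_mid_bounds (lo := a) (hi := b) hab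
          set m := PySem.Int.floordiv (a + b) 2 with hmdef
          simp only [if_pos hab]
          have hch := pvWt_children a b m hm.1 hm.2
          rw [ih _ res ?_]
          · have hsp := pvRange_split a b hab
            rw [← hmdef] at hsp
            have hm2 : (a + b) / 2 = m := by
              rw [hmdef]; exact (PySem.Int.floordiv_eq_ediv_of_pos (by norm_num)).symm
            by_cases hl : a ≤ m - 1 <;> by_cases hr : m + 1 ≤ b
            · simp only [if_pos hl, if_pos hr]
              simp [pvVal, hsp, ← hmdef, hm2]
            · have hR : PySem.List.pyRange (m + 1) (b + 1) 1 = [] :=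
                PySem.List.pyRange_one_eq_nil (by omega)
              simp only [if_pos hl, if_neg hr]
              simp [pvVal, hsp, hR, ← hmdef, hm2]
            · have hL : PySem.List.pyRange a m 1 = [] :=
                PySem.List.pyRange_one_eq_nil (by omega)
              simp only [if_neg hl, if_pos hr]
              simp [pvVal, hL, hsp, ← hmdef, hm2]
            · have hR : PySem.List.pyRange (m + 1) (b + 1) 1 = [] :=
                PySem.List.pyRange_one_eq_nil (by omega)
              have hL : PySem.List.pyRange a m 1 = [] :=
                PySem.List.pyRange_one_eq_nil (by omega)
              simp only [if_neg hl, if_neg hr]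
              simp [pvVal, hL, hR, hsp, ← hmdef, hm2]
          · -- fuel accounting
            simp only [pvWt, if_neg (Bool.false_ne_true), if_pos hab] at h
            simp only [List.append_assoc, List.map_append, List.sum_append] at hch ⊢
            simp only [pvWt, if_neg (Bool.false_ne_true), if_pos hab] at hch
            omega
        · simp only [if_neg hab]
          rw [ih S res (by simp [pvWt, hab] at h; omega)]
          simp [pvVal, PySem.List.pyRange_one_eq_nil (show b + 1 ≤ a by omega)]

-- ===== VERDICT (by name: the statement is the Claim_ definition above) =====
theorem function_3_spec : Claim_equal_function_3 := by
  intro a b _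
  unfold Spec_function_3 function_3 function_3_alt
  rw [pvLoop_fuel_enough (pvWt (a, b, false)) [(a, b, false)] [] (by simp)]
  simp [pvVal]
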